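-- pv_equiv track=rewrite | github.com/RacleRay/MyLeetCodeLife | Book_part/Efficient_Algorithm/string/rabin-karp.py | rk_common_string
-- ===== SOURCE A (Python) =====
-- PRIME = 72057594037927931     # < 2^{56}
--
-- DOMAIN = 128                  # 进制
--
-- def roll_hash(old_val, out_digit, in_digit, last_pos):
--     """roll_hash ：向右移动窗口的递推hash值，减去左边第一个，加上右边下一个
--     %PRIME -- 完成所有运算再取模，等价于分别取模之后再完成运算
--     """
--     val = (old_val - out_digit * last_pos + DOMAIN * PRIME) % PRIME
--     val = (val * DOMAIN) % PRIME
--     return (val + in_digit) % PRIME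
--
-- def match(s, t, i, j, k):
--     """当hash值相同时，进行检测。当PRIME很大，也可以不检测，因为hash冲突概率很小。"""
--     for d in range(k):
--         if s[i + d] != t[j + d]:
--             return False
--     return True
--
-- def rk_common_string(s, t, k):
--     """Find a common factor by Rabin-Karp
--
--     :param int k: factor length
--     :returns: (i, j) such that s[i:i + k] == t[j:j + k] or None.
--               In case of tie, lexicographical minimum (i, j) is returned
--     :complexity: O(len(s) + len(t)) in expected time,
--                 and O(len(s) + len(t) * k) in worst case
--     """
--     last_pos = pow(DOMAIN, k - 1) % PRIME
--     pos = {}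
--     assert k > 0
--     if len(s) < k or len(t) < k:
--         return None
--     hash_t = 0
--
--     # 先找到其中一个序列的所有k长度的substring hash
--     for j in range(k):
--         hash_t = (DOMAIN * hash_t + ord(t[j])) % PRIME
--     for j in range(len(t) - k + 1):
--         # store the start position with the hash value
--         if hash_t in pos:
--             pos[hash_t].append(j)
--         else:
--             pos[hash_t] = [j]
--         if j < len(t) - k:
--             hash_t = roll_hash(hash_t, ord(t[j]), ord(t[j + k]), last_pos)
--
--     hash_s = 0
--     # Now check for matching factors in s
--     for i in range(k):         # preprocessing
--         hash_s = (DOMAIN * hash_s + ord(s[i])) % PRIME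
--     for i in range(len(s) - k + 1):
--         if hash_s in pos:
--             for j in pos[hash_s]:
--                 if match(s, t, i, j, k):
--                     return (i, j)
--         if i < len(s) - k:
--             hash_s = roll_hash(hash_s, ord(s[i]), ord(s[i + k]), last_pos)
--     return None
-- ===== SOURCE B (Python) =====
-- def rk_common_string(s, t, k):
--     """Find a common length-k factor by direct substring indexing.
--
--     Same contract as A: returns lexicographically minimal (i, j) with
--     s[i:i+k] == t[j:j+k], or None.
--     """
--     assert k > 0
--     if len(s) < k or len(t) < k:
--         return None
--     pos = {}
--     for j in range(len(t) - k + 1):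
--         pos.setdefault(t[j:j+k], j)
--     for i in range(len(s) - k + 1):
--         j = pos.get(s[i:i+k])
--         if j is not None:
--             return (i, j)
--     return None
-- ===== Notes on version B (the rewrite author's own statement) =====
-- stated objective: simpler
-- what changed: Replaced the Rabin-Karp rolling-hash pipeline (modular hash precomputation, roll_hash window updates, hash-bucket dict of position lists, and a character-by-character verification loop) with a direct dictionary from each length-k substring of t to its smallest start index, looked up with each substring of s.
import Mathlib
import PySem

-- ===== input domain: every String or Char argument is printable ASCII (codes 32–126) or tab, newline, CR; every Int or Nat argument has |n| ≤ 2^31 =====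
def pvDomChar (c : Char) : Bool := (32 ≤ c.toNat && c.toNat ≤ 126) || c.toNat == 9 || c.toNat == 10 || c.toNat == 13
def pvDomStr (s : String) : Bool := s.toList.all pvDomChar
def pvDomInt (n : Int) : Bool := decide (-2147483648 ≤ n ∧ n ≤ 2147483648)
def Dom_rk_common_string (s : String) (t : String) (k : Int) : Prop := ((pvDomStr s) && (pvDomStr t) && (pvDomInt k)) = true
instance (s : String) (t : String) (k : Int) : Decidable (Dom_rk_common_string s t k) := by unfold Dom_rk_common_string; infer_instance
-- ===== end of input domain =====

-- B replaces A's rolling-hash machinery by a direct dict from each length-k substring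
-- of t to its smallest start index (objective: simpler).

-- ===== PORT A =====
def pvP : Int := 72057594037927931

def pvRoll (oldVal outD inD lp : Int) : Int :=
  let val := PySem.Int.mod (oldVal - outD * lp + 128 * pvP) pvP
  let val := PySem.Int.mod (val * 128) pvP
  PySem.Int.mod (val + inD) pvP

-- match(s, t, i, j, k): scan d in range(k), False at first mismatch
def pvMatch (ss ts : List Char) (i j kn : Nat) : Bool :=
  (List.range kn).all (fun d => ss.getD (i + d) ' ' == ts.getD (j + d) ' ')

-- the 'for j in range(len(t)-k+1)' loop of A: fuel = remaining iterations
def pvTLoop (ts : List Char) (kn nt : Nat) (lp : Int) :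
    Nat → Nat → Int → PySem.Dict Int (List Int) → PySem.Dict Int (List Int)
  | 0, _, _, pos => pos
  | fuel + 1, j, ht, pos =>
    let pos' := match pos.get? ht with
      | some l => pos.insert ht (l ++ [(j : Int)])
      | none => pos.insert ht [(j : Int)]
    let ht' := if j < nt then
        pvRoll ht ((ts.getD j ' ').toNat : Int) ((ts.getD (j + kn) ' ').toNat : Int) lp
      else ht
    pvTLoop ts kn nt lp fuel (j + 1) ht' pos'

-- the 'for i in range(len(s)-k+1)' loop of A, with the early return
def pvSLoop (ss ts : List Char) (kn ns : Nat) (lp : Int) (pos : PySem.Dict Int (List Int)) :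
    Nat → Nat → Int → Option (Int × Int)
  | 0, _, _ => none
  | fuel + 1, i, hs =>
    let found : Option (Int × Int) := match pos.get? hs with
      | some l => (l.find? (fun j => pvMatch ss ts i j.toNat kn)).map (fun j => ((i : Int), j))
      | none => none
    match found with
    | some r => some r
    | none =>
      let hs' := if i < ns then
          pvRoll hs ((ss.getD i ' ').toNat : Int) ((ss.getD (i + kn) ' ').toNat : Int) lp
        else hs
      pvSLoop ss ts kn ns lp pos fuel (i + 1) hs'

def rk_common_string (s : String) (t : String) (k : Int) : Option (Int × Int) :=
  if 0 < k then
    let kn := k.toNat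
    let ss := s.toList
    let ts := t.toList
    let lp := PySem.Int.mod ((128 : Int) ^ (kn - 1)) pvP
    if ss.length < kn || ts.length < kn then none
    else
      let ht0 := (ts.take kn).foldl (fun a c => PySem.Int.mod (128 * a + (c.toNat : Int)) pvP) 0
      let pos := pvTLoop ts kn (ts.length - kn) lp (ts.length - kn + 1) 0 ht0 PySem.Dict.empty
      let hs0 := (ss.take kn).foldl (fun a c => PySem.Int.mod (128 * a + (c.toNat : Int)) pvP) 0
      pvSLoop ss ts kn (ss.length - kn) lp pos (ss.length - kn + 1) 0 hs0
  else none  -- assert k > 0 raises here; excluded by Pre_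

-- ===== PORT B =====
def pvBLoopT (ts : List Char) (kn : Nat) :
    Nat → Nat → PySem.Dict (List Char) Int → PySem.Dict (List Char) Int
  | 0, _, pos => pos
  | fuel + 1, j, pos => pvBLoopT ts kn fuel (j + 1) (pos.setdefault ((ts.drop j).take kn) (j : Int))

def pvBLoopS (ss : List Char) (kn : Nat) (pos : PySem.Dict (List Char) Int) :
    Nat → Nat → Option (Int × Int)
  | 0, _ => none
  | fuel + 1, i =>
    match pos.get? ((ss.drop i).take kn) with
    | some j => some ((i : Int), j)
    | none => pvBLoopS ss kn pos fuel (i + 1)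

def rk_common_string_alt (s : String) (t : String) (k : Int) : Option (Int × Int) :=
  if 0 < k then
    let kn := k.toNat
    let ss := s.toList
    let ts := t.toList
    if ss.length < kn || ts.length < kn then none
    else
      let pos := pvBLoopT ts kn (ts.length - kn + 1) 0 PySem.Dict.empty
      pvBLoopS ss kn pos (ss.length - kn + 1) 0
  else none  -- assert k > 0 raises here too; excluded by Pre_

-- ===== PRECONDITION & SPEC =====
-- Pre_ excludes k ≤ 0, where both A's and B's 'assert k > 0' raises AssertionError.
def Pre_rk_common_string (s : String) (t : String) (k : Int) : Prop := 0 < k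
instance (s : String) (t : String) (k : Int) : Decidable (Pre_rk_common_string s t k) := by
  unfold Pre_rk_common_string; infer_instance

def pvWitness_rk_common_string : String × String × Int := ("abc", "bcd", 2)

def Spec_rk_common_string (s : String) (t : String) (k : Int) (out : Option (Int × Int)) : Prop :=
  out = rk_common_string_alt s t k
instance (s : String) (t : String) (k : Int) (out : Option (Int × Int)) :
    Decidable (Spec_rk_common_string s t k out) := by unfold Spec_rk_common_string; infer_instance

-- ===== CLAIM (what is proved, stated in full; the proofs are below) =====
def Claim_equal_rk_common_string : Prop := ∀ (s : String) (t : String) (k : Int),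
  Dom_rk_common_string s t k → Pre_rk_common_string s t k →
  Spec_rk_common_string s t k (rk_common_string s t k)

-- ===== LEMMAS AND PROOFS =====

-- the length-kn window of l at position j
def pvWin (l : List Char) (j kn : Nat) : List Char := (l.drop j).take kn

-- the polynomial hash both preprocessing loops of A compute
def pvH (w : List Char) : Int :=
  w.foldl (fun a c => PySem.Int.mod (128 * a + (c.toNat : Int)) pvP) 0


-- reference versions of A's two loops with the tracked hash replaced by pvH of the window
def pvTFold (ts : List Char) (kn : Nat) :
    Nat → Nat → PySem.Dict Int (List Int) → PySem.Dict Int (List Int)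
  | 0, _, pos => pos
  | fuel + 1, j, pos =>
    pvTFold ts kn fuel (j + 1)
      (pos.insert (pvH (pvWin ts j kn))
        (((pos.get? (pvH (pvWin ts j kn))).getD []) ++ [(j : Int)]))

def pvSFold (ss ts : List Char) (kn : Nat) (pos : PySem.Dict Int (List Int)) :
    Nat → Nat → Option (Int × Int)
  | 0, _ => none
  | fuel + 1, i =>
    match (((pos.get? (pvH (pvWin ss i kn))).getD []).find?
        (fun j => pvMatch ss ts i j.toNat kn)).map (fun j => ((i : Int), j)) with
    | some r => some r
    | none => pvSFold ss ts kn pos fuel (i + 1)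

theorem pvP_pos : (0 : Int) < pvP := by norm_num [pvP]

theorem pvMod_eq (a : Int) : PySem.Int.mod a pvP = a % pvP :=
  PySem.Int.mod_eq_emod_of_pos pvP_pos

theorem pvMeq (a : Int) : a % pvP ≡ a [ZMOD pvP] := Int.emod_emod_of_dvd a dvd_rfl

theorem pvFoldl_modeq (w : List Char) :
    ∀ x : Int,
      (w.foldl (fun a c => PySem.Int.mod (128 * a + (c.toNat : Int)) pvP) x) ≡
        x * 128 ^ w.length + pvH w [ZMOD pvP] := by
  induction w with
  | nil => intro x; simp [pvH]
  | cons c w ih =>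
    intro x
    have hfx : PySem.Int.mod (128 * x + (c.toNat : Int)) pvP ≡ 128 * x + (c.toNat : Int) [ZMOD pvP] := by
      rw [pvMod_eq]; exact pvMeq _
    have hH : pvH (c :: w) ≡ (c.toNat : Int) * 128 ^ w.length + pvH w [ZMOD pvP] := by
      have h0 : pvH (c :: w) =
          w.foldl (fun a c => PySem.Int.mod (128 * a + (c.toNat : Int)) pvP)
            (PySem.Int.mod (128 * 0 + (c.toNat : Int)) pvP) := by
        simp [pvH]
      rw [h0]
      calc w.foldl (fun a c => PySem.Int.mod (128 * a + (c.toNat : Int)) pvP)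
              (PySem.Int.mod (128 * 0 + (c.toNat : Int)) pvP) ≡
            (PySem.Int.mod (128 * 0 + (c.toNat : Int)) pvP) * 128 ^ w.length + pvH w [ZMOD pvP] := ih _
        _ ≡ (128 * 0 + (c.toNat : Int)) * 128 ^ w.length + pvH w [ZMOD pvP] :=
            ((by rw [pvMod_eq]; exact pvMeq _ : PySem.Int.mod (128 * 0 + (c.toNat : Int)) pvP ≡
              (128 * 0 + (c.toNat : Int)) [ZMOD pvP]).mul_right _).add_right _
        _ = (c.toNat : Int) * 128 ^ w.length + pvH w := by ring_nf
    calc (c :: w).foldl (fun a c => PySem.Int.mod (128 * a + (c.toNat : Int)) pvP) x ≡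
          (PySem.Int.mod (128 * x + (c.toNat : Int)) pvP) * 128 ^ w.length + pvH w [ZMOD pvP] := ih _
      _ ≡ (128 * x + (c.toNat : Int)) * 128 ^ w.length + pvH w [ZMOD pvP] :=
          (hfx.mul_right _).add_right _
      _ = x * 128 ^ (w.length + 1) + ((c.toNat : Int) * 128 ^ w.length + pvH w) := by ring
      _ ≡ x * 128 ^ (w.length + 1) + pvH (c :: w) [ZMOD pvP] := (hH.symm).add_left _
      _ = x * 128 ^ (c :: w).length + pvH (c :: w) := by simp

theorem pvH_append (w : List Char) (c : Char) :
    pvH (w ++ [c]) = (128 * pvH w + (c.toNat : Int)) % pvP := by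
  simp [pvH, List.foldl_append, pvMod_eq]

theorem pvH_head_tail (w : List Char) (hw : w ≠ []) :
    pvH w ≡ ((w.head hw).toNat : Int) * 128 ^ (w.length - 1) + pvH w.tail [ZMOD pvP] := by
  have h0 : pvH w =
      w.tail.foldl (fun a c => PySem.Int.mod (128 * a + (c.toNat : Int)) pvP)
        (PySem.Int.mod (128 * 0 + ((w.head hw).toNat : Int)) pvP) := by
    conv_lhs => rw [pvH, ← List.cons_head_tail hw]
    rfl
  have hlen : w.tail.length = w.length - 1 := by simp
  rw [h0, ← hlen]
  calc w.tail.foldl (fun a c => PySem.Int.mod (128 * a + (c.toNat : Int)) pvP)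
          (PySem.Int.mod (128 * 0 + ((w.head hw).toNat : Int)) pvP) ≡
        (PySem.Int.mod (128 * 0 + ((w.head hw).toNat : Int)) pvP) * 128 ^ w.tail.length + pvH w.tail [ZMOD pvP] :=
      pvFoldl_modeq _ _
    _ ≡ (128 * 0 + ((w.head hw).toNat : Int)) * 128 ^ w.tail.length + pvH w.tail [ZMOD pvP] :=
      ((by rw [pvMod_eq]; exact pvMeq _ : PySem.Int.mod (128 * 0 + ((w.head hw).toNat : Int)) pvP ≡
        (128 * 0 + ((w.head hw).toNat : Int)) [ZMOD pvP]).mul_right _).add_right _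
    _ = ((w.head hw).toNat : Int) * 128 ^ w.tail.length + pvH w.tail := by ring_nf

theorem pvRoll_eq (w : List Char) (c : Char) (hw : w ≠ []) :
    pvRoll (pvH w) (((w.head hw).toNat : Int)) ((c.toNat : Int))
        (PySem.Int.mod ((128 : Int) ^ (w.length - 1)) pvP) = pvH (w.tail ++ [c]) := by
  have hlp : PySem.Int.mod ((128 : Int) ^ (w.length - 1)) pvP ≡ (128 : Int) ^ (w.length - 1) [ZMOD pvP] := by
    rw [pvMod_eq]; exact pvMeq _
  have hzero : (128 : Int) * pvP ≡ 0 [ZMOD pvP] :=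
    Int.modEq_zero_iff_dvd.mpr ⟨128, by ring⟩
  have hH := pvH_head_tail w hw
  rw [pvRoll, pvH_append, pvMod_eq, pvMod_eq, pvMod_eq]
  show _ % pvP = _ % pvP
  calc ((pvH w - ((w.head hw).toNat : Int) * PySem.Int.mod ((128 : Int) ^ (w.length - 1)) pvP +
            128 * pvP) % pvP * 128) % pvP + (c.toNat : Int) ≡
        (pvH w - ((w.head hw).toNat : Int) * PySem.Int.mod ((128 : Int) ^ (w.length - 1)) pvP +
            128 * pvP) % pvP * 128 + (c.toNat : Int) [ZMOD pvP] := (pvMeq _).add_right _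
    _ ≡ (pvH w - ((w.head hw).toNat : Int) * PySem.Int.mod ((128 : Int) ^ (w.length - 1)) pvP +
            128 * pvP) * 128 + (c.toNat : Int) [ZMOD pvP] := ((pvMeq _).mul_right _).add_right _
    _ ≡ ((((w.head hw).toNat : Int) * 128 ^ (w.length - 1) + pvH w.tail) -
            ((w.head hw).toNat : Int) * (128 : Int) ^ (w.length - 1) + 0) * 128 + (c.toNat : Int) [ZMOD pvP] :=
      ((((hH.sub ((hlp.mul_left _))).add hzero)).mul_right _).add_right _
    _ = 128 * pvH w.tail + (c.toNat : Int) := by ring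

theorem pvWin_length {l : List Char} {j kn : Nat} (h : j + kn ≤ l.length) :
    (pvWin l j kn).length = kn := by
  simp [pvWin]; omega

theorem pvWin_ne_nil {l : List Char} {j kn : Nat} (hkn : 1 ≤ kn) (h : j + kn ≤ l.length) :
    pvWin l j kn ≠ [] := by
  intro he
  have := congrArg List.length he
  rw [pvWin_length h] at this
  simp at this
  omega

theorem pvWin_getElem {l : List Char} {j kn d : Nat} (hd : d < kn) (h : j + kn ≤ l.length) :
    (pvWin l j kn)[d]'(by rw [pvWin_length h]; exact hd) = l[j + d]'(by omega) := by
  simp [pvWin]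

theorem pvWin_head {l : List Char} {j kn : Nat} (hkn : 1 ≤ kn) (h : j + kn ≤ l.length) :
    (pvWin l j kn).head (pvWin_ne_nil hkn h) = l[j]'(by omega) := by
  rw [List.head_eq_getElem]
  have := pvWin_getElem (l := l) (j := j) (kn := kn) (d := 0) (by omega) h
  simpa using this

theorem pvWin_shift {l : List Char} {j kn : Nat} (hkn : 1 ≤ kn) (h : j + kn < l.length) :
    (pvWin l j kn).tail ++ [l.getD (j + kn) ' '] = pvWin l (j + 1) kn := by
  obtain ⟨m, rfl⟩ : ∃ m, kn = m + 1 := ⟨kn - 1, by omega⟩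
  have h1 : (pvWin l j (m + 1)).tail = (l.drop (j + 1)).take m := by
    rw [pvWin, ← List.drop_one, List.drop_take, List.drop_drop]
    simp
  have h2 : l.getD (j + m + 1) ' ' = l[j + m + 1]'(by omega) := by
    simp [List.getD, List.getElem?_eq_getElem (by omega : j + m + 1 < l.length)]
  rw [show j + (m + 1) = j + m + 1 by omega] at *
  rw [h1, h2, pvWin, List.take_add_one]
  congr 1
  rw [List.getElem?_drop]
  rw [List.getElem?_eq_getElem (by omega : j + 1 + m < l.length)]
  simp [show j + 1 + m = j + m + 1 by omega]

theorem pvMatch_eq {ss ts : List Char} {i j kn : Nat}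
    (hi : i + kn ≤ ss.length) (hj : j + kn ≤ ts.length) :
    pvMatch ss ts i j kn = (pvWin ts j kn == pvWin ss i kn) := by
  rw [Bool.eq_iff_iff]
  simp only [pvMatch, List.all_eq_true, List.mem_range, beq_iff_eq]
  constructor
  · intro hall
    apply List.ext_getElem (by rw [pvWin_length hj, pvWin_length hi])
    intro d hd _
    have hdk : d < kn := by rwa [pvWin_length hj] at hd
    rw [pvWin_getElem hdk hj, pvWin_getElem hdk hi]
    have := hall d hdk
    rw [List.getD_eq_getElem ss ' ' (by omega), List.getD_eq_getElem ts ' ' (by omega)] at this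
    exact this.symm
  · intro heq d hd
    have := congrArg (fun w => w[d]?) heq
    simp only [List.getElem?_eq_getElem (by rw [pvWin_length hj]; exact hd),
      List.getElem?_eq_getElem (by rw [pvWin_length hi]; exact hd)] at this
    rw [pvWin_getElem hd hj, pvWin_getElem hd hi] at this
    rw [List.getD_eq_getElem ss ' ' (by omega), List.getD_eq_getElem ts ' ' (by omega)]
    exact (Option.some.inj this).symm

theorem pvGetD_getElem {l : List Char} {j : Nat} (h : j < l.length) :
    l.getD j ' ' = l[j]'h := by
  simp [List.getD, List.getElem?_eq_getElem h]

theorem pvTLoop_eq_fold {ts : List Char} {kn nt : Nat} (hkn : 1 ≤ kn) (hts : kn ≤ ts.length)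
    (hnt : nt = ts.length - kn) :
    ∀ (fuel j : Nat) (ht : Int) (pos : PySem.Dict Int (List Int)),
      j + fuel = nt + 1 → ht = pvH (pvWin ts j kn) →
      pvTLoop ts kn nt (PySem.Int.mod ((128 : Int) ^ (kn - 1)) pvP) fuel j ht pos =
        pvTFold ts kn fuel j pos := by
  intro fuel
  induction fuel with
  | zero => intro j ht pos _ _; rfl
  | succ fuel ih =>
    intro j ht pos hj hht
    subst hht
    by_cases hlt : j < nt
    · have hjk : j + kn < ts.length := by omega
      have hwne : pvWin ts j kn ≠ [] := pvWin_ne_nil hkn (by omega)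
      have hroll := pvRoll_eq (pvWin ts j kn) (ts.getD (j + kn) ' ') hwne
      rw [pvWin_head hkn (by omega), pvWin_length (by omega), pvWin_shift hkn hjk,
        ← pvGetD_getElem (show j < ts.length by omega)] at hroll
      cases hp : pos.get? (pvH (pvWin ts j kn)) with
      | none =>
        simp only [pvTLoop, pvTFold, hp, if_pos hlt]
        rw [hroll]
        exact ih (j + 1) _ _ (by omega) rfl
      | some l =>
        simp only [pvTLoop, pvTFold, hp, if_pos hlt]
        rw [hroll]
        exact ih (j + 1) _ _ (by omega) rfl
    · have hf : fuel = 0 := by omega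
      subst hf
      cases hp : pos.get? (pvH (pvWin ts j kn)) <;>
        simp [pvTLoop, pvTFold, hp]

def pvCombine (o : Option (List Int)) (js : List Int) : Option (List Int) :=
  match o, js with
  | none, [] => none
  | none, js => some js
  | some l, js => some (l ++ js)

theorem pvTFold_get? {ts : List Char} {kn : Nat} :
    ∀ (fuel j : Nat) (pos : PySem.Dict Int (List Int)) (h : Int),
      (pvTFold ts kn fuel j pos).get? h =
        pvCombine (pos.get? h)
          (((List.range' j fuel).filter (fun j' => pvH (pvWin ts j' kn) == h)).map
            (fun j' => ((j' : Nat) : Int))) := by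
  intro fuel
  induction fuel with
  | zero =>
    intro j pos h
    cases hp : pos.get? h <;> simp [pvTFold, pvCombine, hp]
  | succ fuel ih =>
    intro j pos h
    rw [pvTFold, ih, List.range'_succ]
    by_cases heq : pvH (pvWin ts j kn) = h
    · subst heq
      simp only [List.filter_cons, beq_self_eq_true, if_true, List.map_cons]
      rw [PySem.Dict.get?_insert]
      simp only [if_true]
      cases pos.get? (pvH (pvWin ts j kn)) <;> simp [pvCombine]
    · have hbeq : (pvH (pvWin ts j kn) == h) = false := by simp [heq]
      simp only [List.filter_cons, hbeq]
      rw [PySem.Dict.get?_insert, if_neg (by exact fun hc => heq hc.symm)]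
      simp

theorem pvBLoopT_get? {ts : List Char} {kn : Nat} :
    ∀ (fuel j : Nat) (pos : PySem.Dict (List Char) Int) (w : List Char),
      (pvBLoopT ts kn fuel j pos).get? w =
        (pos.get? w).or
          (((List.range' j fuel).find? (fun j' => pvWin ts j' kn == w)).map
            (fun j' => ((j' : Nat) : Int))) := by
  intro fuel
  induction fuel with
  | zero => intro j pos w; cases hp : pos.get? w <;> simp [pvBLoopT, hp]
  | succ fuel ih =>
    intro j pos w
    rw [pvBLoopT, ih, List.range'_succ]
    simp only [pvWin]
    by_cases hw : (ts.drop j).take kn = w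
    · subst hw
      rw [PySem.Dict.get?_setdefault_self]
      simp only [List.find?_cons, beq_self_eq_true]
      cases pos.get? ((ts.drop j).take kn) <;> simp
    · have hbeq : ((ts.drop j).take kn == w) = false := by simp [hw]
      rw [PySem.Dict.get?_setdefault_of_ne _ _ (fun hc => hw hc.symm)]
      simp only [List.find?_cons, hbeq]

theorem pvFind?_congr {α : Type} {p q : α → Bool} :
    ∀ l : List α, (∀ a ∈ l, p a = q a) → l.find? p = l.find? q := by
  intro l
  induction l with
  | nil => intro _; rfl
  | cons a l ih =>
    intro h
    have ha := h a (List.mem_cons_self)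
    simp only [List.find?_cons, ha]
    cases q a
    · exact ih fun b hb => h b (List.mem_cons_of_mem a hb)
    · rfl

theorem pvSLoop_eq_fold {ss ts : List Char} {kn ns : Nat} (hkn : 1 ≤ kn) (hss : kn ≤ ss.length)
    (hns : ns = ss.length - kn) (pos : PySem.Dict Int (List Int)) :
    ∀ (fuel i : Nat) (hs : Int), i + fuel = ns + 1 → hs = pvH (pvWin ss i kn) →
      pvSLoop ss ts kn ns (PySem.Int.mod ((128 : Int) ^ (kn - 1)) pvP) pos fuel i hs =
        pvSFold ss ts kn pos fuel i := by
  intro fuel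
  induction fuel with
  | zero => intro i hs _ _; rfl
  | succ fuel ih =>
    intro i hs hi hhs
    subst hhs
    by_cases hlt : i < ns
    · have hik : i + kn < ss.length := by omega
      have hwne : pvWin ss i kn ≠ [] := pvWin_ne_nil hkn (by omega)
      have hroll := pvRoll_eq (pvWin ss i kn) (ss.getD (i + kn) ' ') hwne
      rw [pvWin_head hkn (by omega), pvWin_length (by omega), pvWin_shift hkn hik,
        ← pvGetD_getElem (show i < ss.length by omega)] at hroll
      cases hp : pos.get? (pvH (pvWin ss i kn)) with
      | none =>
        simp only [pvSLoop, pvSFold, hp, Option.getD_none, List.find?_nil, Option.map_none,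
          if_pos hlt]
        rw [hroll]
        exact ih (i + 1) _ (by omega) rfl
      | some l =>
        simp only [pvSLoop, pvSFold, hp, Option.getD_some]
        cases (l.find? (fun j => pvMatch ss ts i j.toNat kn)).map
            (fun j => ((i : Int), j)) with
        | some r => rfl
        | none =>
          simp only [if_pos hlt]
          rw [hroll]
          exact ih (i + 1) _ (by omega) rfl
    · have hf : fuel = 0 := by omega
      subst hf
      cases hp : pos.get? (pvH (pvWin ss i kn)) <;>
          simp only [pvSLoop, pvSFold, hp, Option.getD_some, Option.getD_none,
            List.find?_nil, Option.map_none]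

theorem pvStep_eq {ss ts : List Char} {kn nt i : Nat} (hkn : 1 ≤ kn)
    (hts : kn ≤ ts.length) (hnt : nt = ts.length - kn) (hik : i + kn ≤ ss.length) :
    ((((pvTFold ts kn (nt + 1) 0 PySem.Dict.empty).get?
          (pvH (pvWin ss i kn))).getD []).find?
        (fun j => pvMatch ss ts i j.toNat kn)).map (fun j => ((i : Int), j)) =
      ((pvBLoopT ts kn (nt + 1) 0 PySem.Dict.empty).get? (pvWin ss i kn)).map
        (fun j => ((i : Int), j)) := by
  have hA := pvTFold_get? (ts := ts) (kn := kn) (nt + 1) 0 PySem.Dict.empty (pvH (pvWin ss i kn))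
  have hB := pvBLoopT_get? (ts := ts) (kn := kn) (nt + 1) 0 PySem.Dict.empty (pvWin ss i kn)
  have hempty1 : (PySem.Dict.empty : PySem.Dict Int (List Int)).get? (pvH (pvWin ss i kn)) = none := rfl
  have hempty2 : (PySem.Dict.empty : PySem.Dict (List Char) Int).get? (pvWin ss i kn) = none := rfl
  rw [hempty1] at hA
  rw [hempty2, Option.none_or] at hB
  rw [hA, hB]
  -- the common first-match over the full range
  have hkey : ∀ j' ∈ List.range' 0 (nt + 1),
      (fun j' => (pvH (pvWin ts j' kn) == pvH (pvWin ss i kn)) &&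
        pvMatch ss ts i j' kn) j' = (fun j' => pvWin ts j' kn == pvWin ss i kn) j' := by
    intro j' hj'
    have hj'le : j' + kn ≤ ts.length := by
      have := List.mem_range'_1.mp hj'
      omega
    simp only
    rw [pvMatch_eq hik hj'le]
    by_cases hww : pvWin ts j' kn = pvWin ss i kn
    · simp [hww]
    · simp [hww]
  cases hjs : (List.range' 0 (nt + 1)).filter
      (fun j' => pvH (pvWin ts j' kn) == pvH (pvWin ss i kn)) with
  | nil =>
    -- no hash match at all ⇒ no window match either
    have hfind : (List.range' 0 (nt + 1)).find?
        (fun j' => pvWin ts j' kn == pvWin ss i kn) = none := by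
      rw [List.find?_eq_none]
      intro j' hj' hww
      have hww' : pvWin ts j' kn = pvWin ss i kn := by exact beq_iff_eq.mp hww
      have : j' ∈ (List.range' 0 (nt + 1)).filter
          (fun j' => pvH (pvWin ts j' kn) == pvH (pvWin ss i kn)) := by
        rw [List.mem_filter]
        exact ⟨hj', by rw [hww']; exact beq_self_eq_true _⟩
      rw [hjs] at this
      exact absurd this (List.not_mem_nil)
    simp [pvCombine, hfind]
  | cons a as =>
    have hcomb : pvCombine none (((a :: as).map (fun j' => ((j' : Nat) : Int)))) =
        some ((a :: as).map (fun j' => ((j' : Nat) : Int))) := rfl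
    rw [hcomb]
    simp only [Option.getD_some]
    rw [List.find?_map, ← hjs]
    have htonat : ∀ j' : Nat, (((j' : Nat) : Int)).toNat = j' := fun j' => Int.toNat_natCast j'
    have hpred : (fun j => pvMatch ss ts i j.toNat kn) ∘ (fun j' => ((j' : Nat) : Int)) =
        fun j' => pvMatch ss ts i j' kn := by
      funext j'
      simp [htonat]
    rw [hpred, List.find?_filter]
    have hpred2 : (fun a => decide ((fun j' => pvH (pvWin ts j' kn) == pvH (pvWin ss i kn)) a = true ∧
        (fun j' => pvMatch ss ts i j' kn) a = true)) =
        (fun j' => (pvH (pvWin ts j' kn) == pvH (pvWin ss i kn)) && pvMatch ss ts i j' kn) := by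
      funext j'
      by_cases hd : pvH (pvWin ts j' kn) = pvH (pvWin ss i kn) <;> simp [hd]
    rw [hpred2, pvFind?_congr _ hkey, Option.map_map]

theorem pvSFold_eq_B {ss ts : List Char} {kn nt : Nat} (hkn : 1 ≤ kn)
    (hts : kn ≤ ts.length) (hnt : nt = ts.length - kn) (hss : kn ≤ ss.length) :
    ∀ (fuel i : Nat), i + fuel ≤ ss.length - kn + 1 →
      pvSFold ss ts kn (pvTFold ts kn (nt + 1) 0 PySem.Dict.empty) fuel i =
        pvBLoopS ss kn (pvBLoopT ts kn (nt + 1) 0 PySem.Dict.empty) fuel i := by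
  intro fuel
  induction fuel with
  | zero => intro i _; rfl
  | succ fuel ih =>
    intro i hi
    have hik : i + kn ≤ ss.length := by omega
    have hstep := pvStep_eq (ss := ss) (ts := ts) (kn := kn) (nt := nt) (i := i) hkn hts hnt hik
    simp only [pvWin] at hstep
    simp only [pvSFold, pvBLoopS, pvWin]
    rw [hstep]
    cases hq : (pvBLoopT ts kn (nt + 1) 0 PySem.Dict.empty).get? ((ss.drop i).take kn) with
    | some j => simp
    | none =>
      simp only [Option.map_none]
      exact ih (i + 1) (by omega)

theorem rk_common_string_spec : Claim_equal_rk_common_string := by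
  unfold Claim_equal_rk_common_string
  intro s t k _ hpre
  unfold Spec_rk_common_string
  have hk : 0 < k := hpre
  have hkn : 1 ≤ k.toNat := by omega
  simp only [rk_common_string, rk_common_string_alt, if_pos hk]
  by_cases h1 : s.toList.length < k.toNat
  · have hc : (decide (s.toList.length < k.toNat) || decide (t.toList.length < k.toNat)) = true := by
      simp only [Bool.or_eq_true, decide_eq_true_eq]; exact Or.inl h1
    rw [if_pos hc, if_pos hc]
  · by_cases h2 : t.toList.length < k.toNat
    · have hc : (decide (s.toList.length < k.toNat) || decide (t.toList.length < k.toNat)) = true := by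
        simp only [Bool.or_eq_true, decide_eq_true_eq]; exact Or.inr h2
      rw [if_pos hc, if_pos hc]
    · have hc : ¬((decide (s.toList.length < k.toNat) || decide (t.toList.length < k.toNat)) = true) := by
        simp only [Bool.or_eq_true, decide_eq_true_eq]
        rintro (h | h)
        exacts [h1 h, h2 h]
      rw [if_neg hc, if_neg hc]
      have hts : k.toNat ≤ t.toList.length := by omega
      have hss : k.toNat ≤ s.toList.length := by omega
      have e1 : List.foldl (fun a c => PySem.Int.mod (128 * a + (c.toNat : Int)) pvP) 0
          (List.take k.toNat t.toList) = pvH (pvWin t.toList 0 k.toNat) := rfl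
      have e2 : List.foldl (fun a c => PySem.Int.mod (128 * a + (c.toNat : Int)) pvP) 0
          (List.take k.toNat s.toList) = pvH (pvWin s.toList 0 k.toNat) := rfl
      rw [e1, e2,
        pvTLoop_eq_fold hkn hts rfl _ _ _ _ (by omega) rfl,
        pvSLoop_eq_fold hkn hss rfl _ _ _ _ (by omega) rfl]
      exact pvSFold_eq_B hkn hts rfl hss _ 0 (by omega)
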